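-- pv_equiv track=rewrite | github.com/remusezequiel/Lic.-Ciencia-de-Datos | Algoritmos_Y_Estructuras_De_Datos/aed_1/Practica/CodigoGuiasPython/guia7.py | sec_ordenada
-- ===== SOURCE A (Python) =====
-- def sec_ordenada(s: list[int]) -> int:
--     cantidad: int = 0
--     indice: int
--     cantidad_mayor: int = 0
--     indice_mayor: int
--
--     for i in range(len(s)):
--         if i + 1 < len(s) and s[i] + 1 == s[i + 1]:
--             if cantidad == 0:
--                 indice = i
--             cantidad += 1
--             if cantidad > cantidad_mayor:
--                 cantidad_mayor = cantidad
--                 indice_mayor = indice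
--         else:
--             cantidad = 0
--
--     return indice_mayor
-- ===== SOURCE B (Python) =====
-- def sec_ordenada(s: list[int]) -> int:
--     # DP table of streak lengths, then closed-form argmax arithmetic.
--     e = [0]
--     for x, y in zip(s, s[1:]):
--         e.append(e[-1] + 1 if x + 1 == y else 0)
--     m = max(v for v in e if v)
--     return e.index(m) - m
-- ===== Notes on version B (the rewrite author's own statement) =====
-- stated objective: simpler
-- what changed: A's one-pass state machine (current run length, run start, best length, best start, updated under nested branches) is replaced by building a DP table e of streak lengths over adjacent pairs and returning the closed form e.index(m) - m where m = max(v for v in e if v).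
import Mathlib
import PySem

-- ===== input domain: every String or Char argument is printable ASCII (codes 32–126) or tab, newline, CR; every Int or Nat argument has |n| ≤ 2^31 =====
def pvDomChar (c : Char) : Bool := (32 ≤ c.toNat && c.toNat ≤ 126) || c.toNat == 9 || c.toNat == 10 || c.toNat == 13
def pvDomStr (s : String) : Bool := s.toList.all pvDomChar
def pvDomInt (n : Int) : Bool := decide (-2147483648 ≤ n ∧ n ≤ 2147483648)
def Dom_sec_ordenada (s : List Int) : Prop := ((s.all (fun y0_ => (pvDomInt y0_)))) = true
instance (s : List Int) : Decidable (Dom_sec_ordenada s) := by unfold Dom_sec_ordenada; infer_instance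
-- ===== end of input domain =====

-- B replaces A's one-pass best-run state machine by a DP table e of streak lengths plus the
-- closed-form answer e.index(m) - m with m = max of the positive streaks; objective: simpler.

-- ===== PORT A =====
-- A's loop state: (cantidad, indice, cantidad_mayor, indice_mayor); the two Python variables
-- that start unassigned are initialised to 0 here (under Pre_ they are always assigned).
def stepA (s : List Int) (st : Int × Int × Int × Int) (i : Nat) : Int × Int × Int × Int :=
  if i + 1 < s.length ∧ s.getD i 0 + 1 = s.getD (i+1) 0 then
    let ind := if st.1 = 0 then (i : Int) else st.2.1
    let c := st.1 + 1
    if st.2.2.1 < c then (c, ind, c, ind) else (c, ind, st.2.2.1, st.2.2.2)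
  else (0, st.2.1, st.2.2.1, st.2.2.2)

def sec_ordenada (s : List Int) : Int :=
  ((List.range s.length).foldl (stepA s) (0, 0, 0, 0)).2.2.2

-- ===== PORT B =====
-- e.append(e[-1] + 1 if x + 1 == y else 0)
def stepB (e : List Int) (p : Int × Int) : List Int :=
  e ++ [if p.1 + 1 = p.2 then PySem.List.pyGetD e (-1) 0 + 1 else 0]

-- max(v for v in e if v) raises ValueError when no positive streak exists (outside Pre_);
-- there the port's match takes the none branch.
def sec_ordenada_alt (s : List Int) : Int :=
  let e := (s.zip s.tail).foldl stepB [0]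
  match PySem.List.max? (e.filter (fun v => v != 0)) (fun y => y) with
  | some m => (((PySem.List.index? e m).getD 0 : Nat) : Int) - m
  | none => 0

-- ===== PRECONDITION & SPEC =====
-- Pre_ excludes exactly the inputs with no consecutive +1 pair, on which Python A raises
-- UnboundLocalError (indice_mayor is never assigned).
def Pre_sec_ordenada (s : List Int) : Prop := ∃ p ∈ s.zip s.tail, p.1 + 1 = p.2
instance (s : List Int) : Decidable (Pre_sec_ordenada s) := by unfold Pre_sec_ordenada; infer_instance

def pvWitness_sec_ordenada : List Int := [3, 4, 5, 1]

def Spec_sec_ordenada (s : List Int) (out : Int) : Prop := out = sec_ordenada_alt s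
instance (s : List Int) (out : Int) : Decidable (Spec_sec_ordenada s out) := by unfold Spec_sec_ordenada; infer_instance

-- ===== CLAIM (what is proved, stated in full; the proofs are below) =====
def Claim_equal_sec_ordenada : Prop := ∀ (s : List Int), Dom_sec_ordenada s → Pre_sec_ordenada s → Spec_sec_ordenada s (sec_ordenada s)

-- ===== LEMMAS AND PROOFS =====

-- A's machine after the first m loop indices
def AmS (s : List Int) (m : Nat) : Int × Int × Int × Int :=
  (List.range m).foldl (stepA s) (0, 0, 0, 0)

-- B's table after the first m pairs
def EmS (s : List Int) (m : Nat) : List Int :=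
  ((s.zip s.tail).take m).foldl stepB [0]

lemma zip_len (s : List Int) : (s.zip s.tail).length = s.length - 1 := by
  simp [List.length_zip]

lemma zip_get (s : List Int) (m : Nat) (hm : m < (s.zip s.tail).length) :
    (s.zip s.tail)[m] = (s[m]'(by rw [List.length_zip, List.length_tail] at hm; omega),
                         s[m+1]'(by rw [List.length_zip, List.length_tail] at hm; omega)) := by
  have h1 : m < s.length := by rw [List.length_zip, List.length_tail] at hm; omega
  have h2 : m < s.tail.length := by rw [List.length_tail]; rw [List.length_zip, List.length_tail] at hm; omega
  simp [List.getElem_zip, List.getElem_tail]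

-- The grand invariant connecting A's state with B's table.
lemma sec_inv (s : List Int) (m : Nat) (hm : m ≤ (s.zip s.tail).length) :
    (EmS s m).length = m + 1 ∧
    0 ≤ (AmS s m).1 ∧
    0 ≤ (AmS s m).2.2.1 ∧
    PySem.List.pyGetD (EmS s m) (-1) 0 = (AmS s m).1 ∧
    (AmS s m).2.2.1 ∈ EmS s m ∧
    (∀ y ∈ EmS s m, y ≤ (AmS s m).2.2.1) ∧
    (0 < (AmS s m).1 → (AmS s m).2.1 = (m : Int) - (AmS s m).1) ∧
    (AmS s m).2.2.2 = (((PySem.List.index? (EmS s m) (AmS s m).2.2.1).getD 0 : Nat) : Int) - (AmS s m).2.2.1 ∧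
    ((∃ p ∈ (s.zip s.tail).take m, p.1 + 1 = p.2) → 0 < (AmS s m).2.2.1) := by
  induction m with
  | zero =>
    simp [EmS, AmS, PySem.List.pyGetD, PySem.List.pyGet?, PySem.List.pyIdx?,
      PySem.List.index?]
  | succ m ih =>
    have hm' : m < (s.zip s.tail).length := by omega
    obtain ⟨hlen, hc0, hcm0, hlast, hmem, hub, hind, him, hpos⟩ := ih (by omega)
    have hE1 : EmS s (m+1) = stepB (EmS s m) ((s.zip s.tail)[m]) := by
      unfold EmS
      rw [← List.take_concat_get' _ _ hm', List.foldl_append]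
      simp
    have hA1 : AmS s (m+1) = stepA s (AmS s m) m := by
      unfold AmS
      rw [List.range_succ, List.foldl_append]
      simp
    -- the loop condition at index m equals the pair test on z[m]
    have hzm := zip_get s m hm'
    have hmn : m + 1 < s.length := by rw [List.length_zip, List.length_tail] at hm'; omega
    have hcond : (m + 1 < s.length ∧ s.getD m 0 + 1 = s.getD (m+1) 0) ↔
        ((s.zip s.tail)[m].1 + 1 = (s.zip s.tail)[m].2) := by
      rw [hzm]
      simp [List.getD_eq_getElem?_getD, List.getElem?_eq_getElem (by omega : m < s.length), hmn]
    set z := (s.zip s.tail)[m] with hz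
    set st := AmS s m with hst
    set E := EmS s m with hE
    have hEne : E ≠ [] := by
      intro h; rw [h] at hlen; simp at hlen
    by_cases hp : z.1 + 1 = z.2
    · -- pair step
      have hA2 : AmS s (m+1) =
          (if st.2.2.1 < st.1 + 1
           then (st.1 + 1, (if st.1 = 0 then (m : Int) else st.2.1), st.1 + 1,
                 (if st.1 = 0 then (m : Int) else st.2.1))
           else (st.1 + 1, (if st.1 = 0 then (m : Int) else st.2.1), st.2.2.1, st.2.2.2)) := by
        rw [hA1, stepA, if_pos (hcond.mpr hp)]
      have hE2 : EmS s (m+1) = E ++ [st.1 + 1] := by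
        rw [hE1, stepB, if_pos hp, hlast]
      have hindval : (if st.1 = 0 then (m : Int) else st.2.1) = (m : Int) - st.1 := by
        by_cases h0 : st.1 = 0
        · simp [h0]
        · rw [if_neg h0, hind (by omega)]
      by_cases hlt : st.2.2.1 < st.1 + 1
      · -- new maximum st.1 + 1, first occurrence at position m + 1
        have hnotmem : (st.1 + 1) ∉ E := by
          intro h
          have := hub _ h
          omega
        refine ⟨?_, by rw [hA2, if_pos hlt]; show (0:Int) ≤ st.1 + 1; omega, by rw [hA2, if_pos hlt]; show (0:Int) ≤ st.1 + 1; omega, ?_, ?_, ?_, ?_, ?_, by rw [hA2, if_pos hlt]; intro _; show (0:Int) < st.1 + 1; omega⟩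
        · rw [hE2]; simp [hlen]
        · rw [hE2, hA2, if_pos hlt, PySem.List.pyGetD_neg_one_append_singleton]
        · rw [hE2, hA2, if_pos hlt]; simp
        · rw [hE2, hA2, if_pos hlt]
          intro y hy
          rcases List.mem_append.mp hy with h | h
          · have := hub _ h; simp; omega
          · simp at h; simp [h]
        · rw [hA2, if_pos hlt]
          intro _
          simpa using hindval
        · rw [hE2, hA2, if_pos hlt]
          simp only
          rw [PySem.List.index?_append_singleton_self E _ hnotmem]
          simp [hlen, hindval]
      · -- maximum unchanged
        refine ⟨?_, by rw [hA2, if_neg hlt]; show (0:Int) ≤ st.1 + 1; omega, by rw [hA2, if_neg hlt]; exact hcm0, ?_, ?_, ?_, ?_, ?_, by rw [hA2, if_neg hlt]; intro _; show (0:Int) < st.2.2.1; omega⟩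
        · rw [hE2]; simp [hlen]
        · rw [hE2, hA2, if_neg hlt, PySem.List.pyGetD_neg_one_append_singleton]
        · rw [hE2, hA2, if_neg hlt]
          simp only
          exact List.mem_append.mpr (Or.inl hmem)
        · rw [hE2, hA2, if_neg hlt]
          intro y hy
          rcases List.mem_append.mp hy with h | h
          · exact hub _ h
          · simp at h ⊢; omega
        · rw [hA2, if_neg hlt]
          intro _
          simpa using hindval
        · rw [hE2, hA2, if_neg hlt]
          simp only
          rw [PySem.List.index?_append_of_mem _ hmem]
          exact him
    · -- non-pair step: cantidad resets to 0, a 0 is appended to the table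
      have hA2 : AmS s (m+1) = (0, st.2.1, st.2.2.1, st.2.2.2) := by
        rw [hA1, stepA, if_neg (fun h => hp (hcond.mp h))]
      have hE2 : EmS s (m+1) = E ++ [0] := by
        rw [hE1, stepB, if_neg hp]
      refine ⟨?_, by rw [hA2], by rw [hA2]; exact hcm0, ?_, ?_, ?_, ?_, ?_, ?_⟩
      · rw [hE2]; simp [hlen]
      · rw [hE2, hA2, PySem.List.pyGetD_neg_one_append_singleton]
      · rw [hE2, hA2]
        exact List.mem_append.mpr (Or.inl hmem)
      · rw [hE2, hA2]
        intro y hy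
        rcases List.mem_append.mp hy with h | h
        · exact hub _ h
        · simp at h; simp [h]; exact hcm0
      · rw [hA2]; intro h; simp at h
      · rw [hE2, hA2]
        simp only
        rw [PySem.List.index?_append_of_mem _ hmem]
        exact him
      · rw [hA2]
        intro ⟨p, hpm, hpe⟩
        rw [← List.take_concat_get' _ _ hm'] at hpm
        rcases List.mem_append.mp hpm with hin | hone
        · exact hpos ⟨p, hin, hpe⟩
        · rw [List.mem_singleton] at hone
          rw [hone] at hpe
          exact absurd hpe hp

-- B's max over the non-zero streaks is exactly A's cantidad_mayor
lemma max_eq (s : List Int) (hcm : 0 < (AmS s (s.zip s.tail).length).2.2.1) :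
    PySem.List.max? (((s.zip s.tail).foldl stepB [0]).filter (fun v => v != 0)) (fun y => y)
      = some ((AmS s (s.zip s.tail).length).2.2.1) := by
  obtain ⟨hlen, -, -, -, hmem, hub, -, -, -⟩ := sec_inv s (s.zip s.tail).length (le_refl _)
  have hE : (s.zip s.tail).foldl stepB [0] = EmS s (s.zip s.tail).length := by
    unfold EmS; rw [List.take_length]
  rw [hE]
  have hmemf : (AmS s (s.zip s.tail).length).2.2.1 ∈
      (EmS s (s.zip s.tail).length).filter (fun v => v != 0) :=
    List.mem_filter.mpr ⟨hmem, by simp only [bne_iff_ne, ne_eq]; omega⟩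
  have hne : (EmS s (s.zip s.tail).length).filter (fun v => v != 0) ≠ [] := by
    intro h; rw [h] at hmemf; simp at hmemf
  obtain ⟨v, hv⟩ := Option.ne_none_iff_exists'.mp
    (fun h => hne ((PySem.List.max?_eq_none_iff _ (fun y : Int => y)).mp h))
  rw [hv]
  have hvm := List.mem_filter.mp (PySem.List.max?_mem hv)
  have hvmax := PySem.List.max?_isMax hv
  have h1 : v ≤ (AmS s (s.zip s.tail).length).2.2.1 := hub _ hvm.1
  have h2 : (AmS s (s.zip s.tail).length).2.2.1 ≤ v := hvmax _ hmemf
  congr 1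
  omega

-- the last loop index i = n-1 only resets cantidad; indice_mayor is unchanged
lemma last_step (s : List Int) (h : s ≠ []) :
    sec_ordenada s = (AmS s (s.length - 1)).2.2.2 := by
  have hl : 0 < s.length := List.length_pos_iff.mpr h
  unfold sec_ordenada
  have : s.length = (s.length - 1) + 1 := by omega
  rw [this, List.range_succ, List.foldl_append]
  have hcond : ¬ ((s.length - 1) + 1 < s.length ∧
      s.getD (s.length - 1) 0 + 1 = s.getD ((s.length - 1)+1) 0) := by
    intro hc; omega
  show (stepA s ((List.range (s.length - 1)).foldl (stepA s) (0,0,0,0)) (s.length - 1)).2.2.2 = _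
  rw [stepA, if_neg hcond]
  rfl

lemma main_eq (s : List Int) (hpre : ∃ p ∈ s.zip s.tail, p.1 + 1 = p.2) :
    sec_ordenada s = sec_ordenada_alt s := by
  have h : s ≠ [] := by
    intro he; subst he; simp at hpre
  have hz : (s.zip s.tail).length = s.length - 1 := zip_len s
  obtain ⟨-, -, -, -, -, -, -, him, hpos⟩ := sec_inv s (s.zip s.tail).length (le_refl _)
  have hcm : 0 < (AmS s (s.zip s.tail).length).2.2.1 := by
    apply hpos
    rw [List.take_length]
    exact hpre
  rw [last_step s h, ← hz]
  unfold sec_ordenada_alt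
  simp only
  rw [max_eq s hcm]
  have hE : (s.zip s.tail).foldl stepB [0] = EmS s (s.zip s.tail).length := by
    unfold EmS; rw [List.take_length]
  rw [hE]
  exact him

-- ===== VERDICT (by name: the statement is the Claim_ definition above) =====
theorem sec_ordenada_spec : Claim_equal_sec_ordenada := by
  intro s _ hpre
  unfold Spec_sec_ordenada
  exact main_eq s hpre
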